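-- pv_equiv track=rewrite | github.com/hyunjongkimmath/trouver | trouver/markdown/obsidian/personal/machine_learning/tokenize.py | _search_seq_ind_for_char
-- ===== SOURCE A (Python) =====
-- def _min_max_char_ind_for_seq(
--         offset_for_seq: list[tuple[int,int]] # An item in tokenized['offset_mapping']
--         ):
--     min_char_ind, max_char_ind = 0, 0
--     for inds in offset_for_seq:
--         if inds != (0,0):
--             min_char_ind = inds[0]
--             break
--     for inds in reversed(offset_for_seq):
--         if inds != (0,0):
--             max_char_ind = inds[1]
--             break
--     return min_char_ind, max_char_ind
--
-- def _search_seq_ind_for_char(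
--         offsets: list[tuple[int, int]], # tokenized['offset_mapping']
--         char: int # The index of a character in the original raw text
--         ) -> int:
--     """
--     Binary search the index of the sequence containing the token at the
--     location of the index `char` within the original (raw) text.
--
--     Based on pseudocode from https://pseudoeditor.com/guides/binary-search
--     """
--     left = 0
--     right = len(offsets) - 1
--     while left <= right:
--         mid = (left + right) // 2
--         min_char_ind, max_char_ind = _min_max_char_ind_for_seq(offsets[mid])
--         if min_char_ind <= char and char < max_char_ind:
--             return mid
--         elif max_char_ind <= char:
--             left = mid + 1
--         else:
--             right = mid - 1
--     return -1  # This should not be returned under normal use.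
-- ===== SOURCE B (Python) =====
-- def _search_seq_ind_for_char(
--         offsets: list[tuple[int, int]],  # tokenized['offset_mapping']
--         char: int  # The index of a character in the original raw text
--         ) -> int:
--     """Recursive divide-and-conquer binary search for the sequence index
--     containing character position `char`."""
--     def span(seq):
--         nz = [p for p in seq if p != (0, 0)]
--         if nz:
--             return nz[0][0], nz[-1][1]
--         return 0, 0
--
--     def go(left, right):
--         if left > right:
--             return -1
--         mid = (left + right) // 2
--         lo, hi = span(offsets[mid])
--         if lo <= char < hi:
--             return mid
--         if hi <= char:
--             return go(mid + 1, right)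
--         return go(left, mid - 1)
--
--     return go(0, len(offsets) - 1)
-- ===== Notes on version B (the rewrite author's own statement) =====
-- stated objective: alternative
-- what changed: The iterative while-loop binary search becomes a recursive divide-and-conquer helper, and the two break-on-first-match scans of the (min,max) helper are replaced by a single filtered list whose first/last elements give the span.
import Mathlib
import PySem

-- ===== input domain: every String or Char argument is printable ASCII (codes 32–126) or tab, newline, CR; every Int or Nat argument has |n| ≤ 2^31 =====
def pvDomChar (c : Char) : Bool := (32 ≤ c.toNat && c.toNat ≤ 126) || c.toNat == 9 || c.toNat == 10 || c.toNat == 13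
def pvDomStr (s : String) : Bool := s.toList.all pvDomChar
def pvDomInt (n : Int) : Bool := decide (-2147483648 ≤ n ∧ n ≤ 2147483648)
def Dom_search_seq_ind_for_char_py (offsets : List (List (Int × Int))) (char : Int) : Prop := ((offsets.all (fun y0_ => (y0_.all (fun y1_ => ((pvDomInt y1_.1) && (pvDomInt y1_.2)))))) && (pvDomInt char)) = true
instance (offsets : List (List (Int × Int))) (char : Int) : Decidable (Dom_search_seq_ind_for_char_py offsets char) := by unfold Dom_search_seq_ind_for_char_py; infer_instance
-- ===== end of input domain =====

-- B replaces A's iterative while-loop binary search and two break-on-first-match scans by a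
-- recursive divide-and-conquer helper over one filtered list; alternative decomposition, same cost.

-- ===== PORT A =====
-- first loop of _min_max_char_ind_for_seq: break on first pair ≠ (0,0), take its first component
def pvFirstNZ : List (Int × Int) → Int
  | [] => 0
  | p :: rest => if p ≠ (0, 0) then p.1 else pvFirstNZ rest

-- second loop: over reversed(offset_for_seq), break on first pair ≠ (0,0), take its second component
def pvLastNZ : List (Int × Int) → Int
  | [] => 0
  | p :: rest => if p ≠ (0, 0) then p.2 else pvLastNZ rest

def min_max_char_ind_for_seq_py (offset_for_seq : List (Int × Int)) : Int × Int :=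
  (pvFirstNZ offset_for_seq, pvLastNZ offset_for_seq.reverse)

-- the while loop of A, as recursion on the interval width
def pvLoopA (offsets : List (List (Int × Int))) (char : Int) (left right : Int) : Int :=
  if h : left ≤ right then
    let mid := PySem.Int.floordiv (left + right) 2
    let mm := min_max_char_ind_for_seq_py ((PySem.List.pyGet? offsets mid).getD [])
    if mm.1 ≤ char ∧ char < mm.2 then mid
    else if mm.2 ≤ char then pvLoopA offsets char (mid + 1) right
    else pvLoopA offsets char left (mid - 1)
  else -1
termination_by (right + 1 - left).toNat
decreasing_by
  · have := PySem.Int.floordiv_two_mid_bounds h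
    omega
  · have := PySem.Int.floordiv_two_mid_bounds h
    omega

def search_seq_ind_for_char_py (offsets : List (List (Int × Int))) (char : Int) : Int :=
  pvLoopA offsets char 0 (offsets.length - 1)

-- ===== PORT B =====
-- span: filter out (0,0) once; first/last elements of the filtered list give the character span
def pvSpanB (seq : List (Int × Int)) : Int × Int :=
  let nz := seq.filter (fun p => p ≠ (0, 0))
  if nz.isEmpty then (0, 0)
  else (((nz.head?).getD (0, 0)).1, ((nz.getLast?).getD (0, 0)).2)

def pvGoB (offsets : List (List (Int × Int))) (char : Int) (left right : Int) : Int :=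
  if h : left > right then -1
  else
    let mid := PySem.Int.floordiv (left + right) 2
    let s := pvSpanB ((PySem.List.pyGet? offsets mid).getD [])
    if s.1 ≤ char ∧ char < s.2 then mid
    else if s.2 ≤ char then pvGoB offsets char (mid + 1) right
    else pvGoB offsets char left (mid - 1)
termination_by (right + 1 - left).toNat
decreasing_by
  · have := PySem.Int.floordiv_two_mid_bounds (by omega : left ≤ right)
    omega
  · have := PySem.Int.floordiv_two_mid_bounds (by omega : left ≤ right)
    omega

def search_seq_ind_for_char_py_alt (offsets : List (List (Int × Int))) (char : Int) : Int :=
  pvGoB offsets char 0 (offsets.length - 1)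

-- ===== PRECONDITION & SPEC =====
def Spec_search_seq_ind_for_char_py (offsets : List (List (Int × Int))) (char : Int) (out : Int) : Prop := out = search_seq_ind_for_char_py_alt offsets char
instance (offsets : List (List (Int × Int))) (char : Int) (out : Int) : Decidable (Spec_search_seq_ind_for_char_py offsets char out) := by unfold Spec_search_seq_ind_for_char_py; infer_instance

-- ===== CLAIM (what is proved, stated in full; the proofs are below) =====
def Claim_equal_search_seq_ind_for_char_py : Prop := ∀ (offsets : List (List (Int × Int))) (char : Int), Dom_search_seq_ind_for_char_py offsets char → Spec_search_seq_ind_for_char_py offsets char (search_seq_ind_for_char_py offsets char)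

-- ===== LEMMAS AND PROOFS =====

theorem pvFirstNZ_eq_filter (seq : List (Int × Int)) :
    pvFirstNZ seq = (((seq.filter (fun p => p ≠ (0, 0))).head?).getD (0, 0)).1 := by
  induction seq with
  | nil => rfl
  | cons p rest ih =>
    by_cases hp : p = (0, 0) <;> simp [pvFirstNZ, hp, ih]

theorem pvLastNZ_eq_filter (seq : List (Int × Int)) :
    pvLastNZ seq.reverse = (((seq.filter (fun p => p ≠ (0, 0))).getLast?).getD (0, 0)).2 := by
  have h : ∀ l : List (Int × Int),
      pvLastNZ l = (((l.filter (fun p => p ≠ (0, 0))).head?).getD (0, 0)).2 := by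
    intro l
    induction l with
    | nil => rfl
    | cons p rest ih =>
      by_cases hp : p = (0, 0) <;> simp [pvLastNZ, hp, ih]
  rw [h, List.filter_reverse, List.head?_reverse]

theorem pvSpanB_eq_minMax (seq : List (Int × Int)) :
    pvSpanB seq = min_max_char_ind_for_seq_py seq := by
  unfold pvSpanB min_max_char_ind_for_seq_py
  rw [pvFirstNZ_eq_filter, pvLastNZ_eq_filter]
  cases hnz : seq.filter (fun p => p ≠ (0, 0)) with
  | nil => simp
  | cons q rest => simp

theorem pvGoB_eq_pvLoopA (offsets : List (List (Int × Int))) (char : Int)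
    (left right : Int) : pvGoB offsets char left right = pvLoopA offsets char left right := by
  fun_induction pvGoB offsets char left right with
  | case1 left right h =>
      rw [pvLoopA]
      simp [show ¬ left ≤ right by omega]
  | case2 left right h mid s h1 =>
      rw [pvLoopA]
      simp only [show left ≤ right by omega, dite_true]
      rw [show min_max_char_ind_for_seq_py ((PySem.List.pyGet? offsets mid).getD []) = s from
        (pvSpanB_eq_minMax _).symm]
      have hmid : mid = (left + right) / 2 := PySem.Int.floordiv_eq_ediv_of_pos (by norm_num)
      simp [h1, ← hmid]
  | case3 left right h mid s h1 h2 ih =>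
      rw [pvLoopA]
      simp only [show left ≤ right by omega, dite_true]
      rw [show min_max_char_ind_for_seq_py ((PySem.List.pyGet? offsets mid).getD []) = s from
        (pvSpanB_eq_minMax _).symm]
      have hmid : mid = (left + right) / 2 := PySem.Int.floordiv_eq_ediv_of_pos (by norm_num)
      simp [h1, h2, ih, ← hmid]
  | case4 left right h mid s h1 h2 ih =>
      rw [pvLoopA]
      simp only [show left ≤ right by omega, dite_true]
      rw [show min_max_char_ind_for_seq_py ((PySem.List.pyGet? offsets mid).getD []) = s from
        (pvSpanB_eq_minMax _).symm]
      have hmid : mid = (left + right) / 2 := PySem.Int.floordiv_eq_ediv_of_pos (by norm_num)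
      simp [h1, h2, ih, ← hmid]

-- ===== VERDICT (by name: the statement is the Claim_ definition above) =====
theorem search_seq_ind_for_char_py_spec : Claim_equal_search_seq_ind_for_char_py := by
  intro offsets char _
  unfold Spec_search_seq_ind_for_char_py search_seq_ind_for_char_py search_seq_ind_for_char_py_alt
  exact (pvGoB_eq_pvLoopA offsets char 0 (offsets.length - 1)).symm
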